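-- pv_equiv track=rewrite | github.com/jtherrmann/cs-405 | hw1/tic_tac_toe/game.py | get_win_states
-- ===== SOURCE A (Python) =====
-- def get_win_states(size):
--     states = []
--     for col in range(size):
--         state = 1 << col
--         for _ in range(size - 1):
--             state <<= size
--             state |= 1 << col
--         states.append(state)
--
--     mask = 2**size - 1
--     for row in range(size):
--         state = mask << (row * size)
--         states.append(state)
--
--     # TODO diagonals
--
--     return states
-- ===== SOURCE B (Python) =====
-- def get_win_states(size):
--     col_base = sum(1 << (i * size) for i in range(size))
--     states = [col_base << col for col in range(size)]
--     states += [((1 << size) - 1) << (row * size) for row in range(size)]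
--     return states
-- ===== Notes on version B (the rewrite author's own statement) =====
-- stated objective: simpler
-- what changed: B replaces A's per-column inner accumulation loop (shift-and-or repeated size-1 times for every column) by computing one shared col_base bitmask once and deriving each column state as a single shift col_base << col; rows stay one shift each.
import Mathlib
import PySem

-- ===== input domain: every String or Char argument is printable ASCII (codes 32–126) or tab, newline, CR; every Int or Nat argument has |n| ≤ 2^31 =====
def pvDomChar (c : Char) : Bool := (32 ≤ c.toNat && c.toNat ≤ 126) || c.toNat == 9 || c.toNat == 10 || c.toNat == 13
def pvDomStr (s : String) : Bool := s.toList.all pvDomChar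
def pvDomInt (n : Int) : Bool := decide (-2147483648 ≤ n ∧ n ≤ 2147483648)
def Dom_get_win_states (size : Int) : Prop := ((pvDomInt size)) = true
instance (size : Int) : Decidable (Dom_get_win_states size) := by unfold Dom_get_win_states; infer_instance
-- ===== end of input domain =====

-- B derives every column state by shifting one shared col_base pattern instead of
-- re-accumulating each column with an inner loop (objective: simpler decomposition).

-- ===== PORT A =====
-- Python A. `1 << col` with col ∈ range(size) has col ≥ 0, so `<<< col.toNat` is exact.
-- `mask = 2**size - 1` is ported as 2 ^ size.toNat - 1: exact for size ≥ 0; for size < 0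
-- Python's mask is a float but is never used (the row loop is empty), matching the port.
def get_win_states (size : Int) : List Int :=
  let states : List Int :=
    (PySem.List.pyRange 0 size 1).foldl (fun states col =>
      let state : Int := (1 : Int) <<< col.toNat
      let state : Int :=
        (PySem.List.pyRange 0 (size - 1) 1).foldl (fun state _ =>
          let state := state <<< size.toNat
          PySem.Int.bor state ((1 : Int) <<< col.toNat)) state
      states ++ [state]) []
  let mask : Int := 2 ^ size.toNat - 1
  (PySem.List.pyRange 0 size 1).foldl (fun states row =>
    let state : Int := mask <<< (row * size).toNat
    states ++ [state]) states

-- ===== PORT B =====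
def get_win_states_alt (size : Int) : List Int :=
  let col_base : Int :=
    ((PySem.List.pyRange 0 size 1).map (fun i => (1 : Int) <<< (i * size).toNat)).sum
  let states : List Int :=
    (PySem.List.pyRange 0 size 1).map (fun col => col_base <<< col.toNat)
  states ++
    (PySem.List.pyRange 0 size 1).map (fun row =>
      ((1 : Int) <<< size.toNat - 1) <<< (row * size).toNat)

-- ===== PRECONDITION & SPEC =====
def Spec_get_win_states (size : Int) (out : List Int) : Prop := out = get_win_states_alt size
instance (size : Int) (out : List Int) : Decidable (Spec_get_win_states size out) := by unfold Spec_get_win_states; infer_instance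

-- ===== CLAIM (what is proved, stated in full; the proofs are below) =====
def Claim_equal_get_win_states : Prop := ∀ (size : Int), Dom_get_win_states size → Spec_get_win_states size (get_win_states size)

-- ===== LEMMAS AND PROOFS =====

-- A's inner accumulation loop, run n times from 1 <<< c with chunk size S and c < S,
-- produces (Σ_{i ≤ n} 2^(iS)) shifted left by c.
theorem pv_geom (S n : Nat) :
    ((List.range (n + 1)).map (fun i => (2 : Nat) ^ (i * S))).sum * 2 ^ S + 1
      = ((List.range (n + 1)).map (fun i => (2 : Nat) ^ (i * S))).sum + 2 ^ ((n + 1) * S) := by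
  induction n with
  | zero => simp [add_comm]
  | succ n ih =>
    rw [List.range_succ (n := n + 1), List.map_append, List.sum_append]
    simp only [List.map_cons, List.map_nil, List.sum_cons, List.sum_nil, add_zero]
    have h2 : (n + 1) * S + S = (n + 1 + 1) * S := by ring
    calc ((List.map (fun i => (2:Nat) ^ (i * S)) (List.range (n + 1))).sum + 2 ^ ((n + 1) * S)) * 2 ^ S + 1
        = ((List.map (fun i => (2:Nat) ^ (i * S)) (List.range (n + 1))).sum * 2 ^ S + 1) + 2 ^ ((n + 1) * S) * 2 ^ S := by ring
      _ = (List.map (fun i => (2:Nat) ^ (i * S)) (List.range (n + 1))).sum + 2 ^ ((n + 1) * S) + 2 ^ ((n + 1) * S + S) := by rw [ih, pow_add]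
      _ = _ := by rw [h2]

theorem pv_inner_loop (S c : Nat) (hc : c < S) (n : Nat) :
    (List.range n).foldl (fun state _ =>
        PySem.Int.bor (state <<< S) ((1 : Int) <<< c)) ((1 : Int) <<< c)
      = (((List.range (n + 1)).map (fun i => (2 : Nat) ^ (i * S))).sum : Nat) <<< c := by
  induction n with
  | zero => simp [Nat.shiftLeft_eq, Int.shiftLeft_eq]
  | succ n ih =>
    rw [List.range_succ, List.foldl_append, ih]
    simp only [List.foldl_cons, List.foldl_nil]
    have hcast : ∀ (m : Nat), ((m : Int) <<< S) = ((m <<< S : Nat) : Int) := by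
      intro m; simp [Int.shiftLeft_eq, Nat.shiftLeft_eq]
    have h1 : ((1 : Int) <<< c) = (((1 <<< c : Nat)) : Int) := by
      simp [Int.shiftLeft_eq, Nat.shiftLeft_eq]
    rw [hcast, h1, PySem.Int.bor_natCast]
    have hlt : (1 : Nat) <<< c < 2 ^ S := by
      rw [Nat.shiftLeft_eq, one_mul]; exact Nat.pow_lt_pow_right (by norm_num) hc
    rw [← Nat.shiftLeft_add_eq_or_of_lt hlt]
    norm_cast
    simp only [Nat.shiftLeft_eq, one_mul]
    calc (List.map (fun i => 2 ^ (i * S)) (List.range (n + 1))).sum * 2 ^ c * 2 ^ S + 2 ^ c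
        = ((List.map (fun i => 2 ^ (i * S)) (List.range (n + 1))).sum * 2 ^ S + 1) * 2 ^ c := by ring
      _ = ((List.map (fun i => 2 ^ (i * S)) (List.range (n + 1))).sum + 2 ^ ((n + 1) * S)) * 2 ^ c := by
          rw [pv_geom]
      _ = _ := by
          rw [List.range_succ (n := n + 1), List.map_append, List.sum_append]
          simp only [List.map_cons, List.map_nil, List.sum_cons, List.sum_nil, add_zero]

-- Casting a Nat shift to Int commutes with the shift.
theorem pv_cast_shl (m c : Nat) : (((m <<< c : Nat)) : Int) = ((m : Nat) : Int) <<< c := by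
  simp [Nat.shiftLeft_eq, Int.shiftLeft_eq]

-- The port's `a <<< ↑n` (Int shift by a cast Nat) is the Nat-indexed shift.
theorem pv_shl_int (a : Int) (n : Nat) : a <<< ((n : Int)) = a <<< n := by
  rw [Int.shiftLeft_eq_mul_pow, Int.shiftLeft_eq]
  push_cast; ring

-- The Nat geometric sum of A's loop, cast to Int, is B's col_base sum.
theorem pv_sum_cast (S : Nat) (l : List Nat) :
    (((l.map (fun i => (2 : Nat) ^ (i * S))).sum : Nat) : Int)
      = (l.map (fun i => (1 : Int) <<< (i * S))).sum := by
  induction l with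
  | nil => simp
  | cons x xs ih =>
    simp only [List.map_cons, List.sum_cons, Nat.cast_add, ih]
    simp [Int.shiftLeft_eq]

-- Pointwise: A's column state for a column c < S equals B's col_base shifted by c.
theorem pv_col_eq (S : Nat) (hS : 0 < S) (c : Nat) (hc : c < S) :
    (List.range (S - 1)).foldl (fun state _ =>
        PySem.Int.bor (state <<< S) ((1 : Int) <<< c)) ((1 : Int) <<< c)
      = (((List.range S).map (fun i => (1 : Int) <<< (i * S))).sum) <<< c := by
  rw [pv_inner_loop S c hc, Nat.sub_add_cancel hS, pv_cast_shl, pv_sum_cast]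

theorem get_win_states_spec : Claim_equal_get_win_states := by
  intro size _
  unfold Spec_get_win_states get_win_states get_win_states_alt
  simp only [pv_shl_int]
  by_cases hpos : 0 < size
  · have h0 : (0 : Int) ≤ size := le_of_lt hpos
    have hrange : PySem.List.pyRange 0 size 1
        = List.map (fun (k : Nat) => (k : Int)) (List.range size.toNat) := by
      rw [PySem.List.pyRange_one]
      simp only [sub_zero, zero_add]
    rw [hrange]
    rw [PySem.List.foldl_append_singleton_eq_map, PySem.List.foldl_append_singleton_eq_map]
    simp only [List.nil_append, List.map_map]
    congr 1
    · -- columns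
      apply List.map_congr_left
      intro k hk
      have hkS : k < size.toNat := List.mem_range.mp hk
      simp only [Function.comp]
      -- reduce the inner pyRange fold (element unused) to a List.range fold
      have hfold : PySem.List.pyRange 0 (size - 1) 1
          = List.map (fun (j : Nat) => (j : Int)) (List.range ((size - 1)).toNat) := by
        rw [PySem.List.pyRange_one]; simp only [sub_zero, zero_add]
      rw [hfold, List.foldl_map]
      have hsub : (size - 1).toNat = size.toNat - 1 := by omega
      simp only [Int.toNat_natCast, hsub]
      rw [pv_col_eq size.toNat (by omega) k hkS]
      congr 1
      congr 1
      apply List.map_congr_left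
      intro i hi
      have : ((i : Int) * size).toNat = i * size.toNat := by
        have : ((i : Int)) * size = ((i * size.toNat : Nat) : Int) := by
          push_cast [Int.toNat_of_nonneg h0]; ring
        rw [this, Int.toNat_natCast]
      simp only [Function.comp, this]
    · -- rows
      apply List.map_congr_left
      intro k _
      simp only [Function.comp]
      simp [Int.shiftLeft_eq]
  · have hnil : PySem.List.pyRange 0 size 1 = [] :=
      PySem.List.pyRange_one_eq_nil (by omega)
    simp [hnil]
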